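-- pv_equiv track=rewrite | github.com/brianoin/mahjongproject | Point_Calculation.py | is_san_shoku_doukou
-- ===== SOURCE A (Python) =====
-- def is_san_shoku_doukou(hand, melds):
--     """ 判斷是否為三色同刻（2番）：萬、筒、索各一組相同數字的刻子 """
--     all_tiles = hand + [t for meld in melds for t in meld]
--     tile_counts = {}
--
--     for tile in all_tiles:
--         suit, num = tile.split("_")
--         key = (num, suit)
--         tile_counts[key] = tile_counts.get(key, 0) + 1
--
--     # 建立：數字 → 出現刻子的花色集合
--     doku_map = {}
--     for (num, suit), count in tile_counts.items():
--         if count >= 3: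
--             doku_map.setdefault(num, set()).add(suit)
--
--     # 若某數字在三種花色都有刻子
--     return any(len(suits) == 3 for suits in doku_map.values())
-- ===== SOURCE B (Python) =====
-- def is_san_shoku_doukou(hand, melds):
--     """B: no dictionaries -- split every tile into a (num, suit) pair, stable-sort
--     the pairs by suit then by number (so pairs are in (num, suit) lexicographic
--     order), and make one scan over the runs: a run of >= 3 equal pairs is a
--     triplet, counted per number block; succeed iff some block has exactly 3."""
--     pairs = []
--     for tile in hand + [t for meld in melds for t in meld]:
--         suit, num = tile.split("_")
--         pairs.append((num, suit))
--     pairs.sort(key=lambda p: p[1])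
--     pairs.sort(key=lambda p: p[0])
--     i, n = 0, len(pairs)
--     while i < n:
--         num = pairs[i][0]
--         trips = 0
--         while i < n and pairs[i][0] == num:
--             j = i
--             while j < n and pairs[j] == pairs[i]:
--                 j += 1
--             if j - i >= 3:
--                 trips += 1
--             i = j
--         if trips == 3:
--             return True
--     return False
-- ===== Notes on version B (the rewrite author's own statement) =====
-- stated objective: alternative
-- what changed: B replaces A's hash-map counting (a (num,suit) counter dict plus a num->set-of-suits grouping dict) with a dictionary-free sort-based algorithm: two stable sorts put the (num,suit) pairs in lexicographic order, then a single run-length scan counts >=3-long runs per number block and tests for exactly 3.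
import Mathlib
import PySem

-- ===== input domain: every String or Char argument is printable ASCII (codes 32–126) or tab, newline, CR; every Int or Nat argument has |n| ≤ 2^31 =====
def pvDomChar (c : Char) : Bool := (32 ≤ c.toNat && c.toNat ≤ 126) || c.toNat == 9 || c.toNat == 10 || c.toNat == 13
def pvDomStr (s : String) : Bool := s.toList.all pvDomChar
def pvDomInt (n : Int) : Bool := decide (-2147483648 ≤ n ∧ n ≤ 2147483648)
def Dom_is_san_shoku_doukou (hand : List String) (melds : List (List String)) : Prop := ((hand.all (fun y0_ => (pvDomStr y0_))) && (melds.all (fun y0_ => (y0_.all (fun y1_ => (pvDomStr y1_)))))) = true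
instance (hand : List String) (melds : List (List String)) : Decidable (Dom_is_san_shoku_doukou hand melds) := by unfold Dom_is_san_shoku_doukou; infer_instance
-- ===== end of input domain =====

-- B is a dictionary-free alternative: it splits the tiles into (num, suit) pairs, stable-sorts
-- them by suit then by number, and finds triplets by one run-length scan over the sorted pairs.


-- ===== PORT A =====
-- 'for tile in all_tiles: suit, num = tile.split("_"); tile_counts[key] = tile_counts.get(key,0)+1'
-- none = the ValueError of the unpacking when the split does not give exactly two parts.
def pvCountLoopA : List String → PySem.Dict (String × String) Int →
    Option (PySem.Dict (String × String) Int)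
  | [], d => some d
  | tile :: rest, d =>
    match PySem.Str.split? tile "_" with
    | some [suit, num] => pvCountLoopA rest (d.insert (num, suit) (d.getD (num, suit) 0 + 1))
    | _ => none

-- 'for (num, suit), count in tile_counts.items(): if count >= 3: doku_map.setdefault(num, set()).add(suit)'
def pvDokuLoopA (items : List ((String × String) × Int)) : PySem.Dict String (PySem.Set String) :=
  items.foldl
    (fun dm p => if p.2 ≥ 3 then dm.modify p.1.1 PySem.Set.empty (fun s => s.add p.1.2) else dm)
    PySem.Dict.empty

def is_san_shoku_doukou (hand : List String) (melds : List (List String)) : Bool :=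
  let all_tiles := hand ++ melds.flatMap (fun meld => meld)
  match pvCountLoopA all_tiles PySem.Dict.empty with
  | none => false
  | some tile_counts =>
      (pvDokuLoopA tile_counts.items).values.any
        (fun suits => PySem.Set.len suits == 3)

-- ===== PORT B =====
-- 'for tile in …: suit, num = tile.split("_"); pairs.append((num, suit))'
-- none = the ValueError of the unpacking when the split does not give exactly two parts.
def pvPairLoopB : List String → List (String × String) → Option (List (String × String))
  | [], acc => some acc
  | tile :: rest, acc =>
    match PySem.Str.split? tile "_" with
    | some [suit, num] => pvPairLoopB rest (acc ++ [(num, suit)])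
    | _ => none

-- the inner 'while i < n and pairs[i][0] == num' loop: j scans past the run of pairs
-- equal to pairs[i]; a run of length >= 3 bumps trips; i jumps to j
def pvInnerRunsB : List (String × String) → Int → Int
  | [], trips => trips
  | p :: rest, trips =>
    pvInnerRunsB (rest.dropWhile (fun q => q == p))
      (if (rest.takeWhile (fun q => q == p)).length + 1 ≥ 3 then trips + 1 else trips)
termination_by l => l.length
decreasing_by simp; exact List.length_dropWhile_le _ _

-- the outer 'while i < n' loop: one number block per iteration, 'if trips == 3: return True'
def pvOuterScanB : List (String × String) → Bool
  | [] => false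
  | p :: rest =>
    if pvInnerRunsB (p :: rest.takeWhile (fun q => q.1 == p.1)) 0 == 3 then true
    else pvOuterScanB (rest.dropWhile (fun q => q.1 == p.1))
termination_by l => l.length
decreasing_by simp; exact List.length_dropWhile_le _ _

def is_san_shoku_doukou_alt (hand : List String) (melds : List (List String)) : Bool :=
  match pvPairLoopB (hand ++ melds.flatMap (fun meld => meld)) [] with
  | none => false
  | some pairs =>
      pvOuterScanB (PySem.List.sorted (PySem.List.sorted pairs (fun p => p.2)) (fun p => p.1))

-- ===== PRECONDITION & SPEC =====
-- Pre_ excludes exactly the inputs where A raises ValueError: a tile whose split on "_" does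
-- not give exactly two parts (no underscore, or more than one).
def Pre_is_san_shoku_doukou (hand : List String) (melds : List (List String)) : Prop :=
  ∀ t ∈ hand ++ melds.flatMap (fun meld => meld), ((PySem.Str.split? t "_").getD []).length = 2
instance (hand : List String) (melds : List (List String)) : Decidable (Pre_is_san_shoku_doukou hand melds) := by unfold Pre_is_san_shoku_doukou; infer_instance

def pvWitness_is_san_shoku_doukou : List String × List (List String) :=
  (["man_3", "pin_3", "sou_3"], [["man_3", "man_3"], ["pin_3", "pin_3", "sou_3", "sou_3"]])

def Spec_is_san_shoku_doukou (hand : List String) (melds : List (List String)) (out : Bool) : Prop := out = is_san_shoku_doukou_alt hand melds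
instance (hand : List String) (melds : List (List String)) (out : Bool) : Decidable (Spec_is_san_shoku_doukou hand melds out) := by unfold Spec_is_san_shoku_doukou; infer_instance

-- ===== CLAIM (what is proved, stated in full; the proofs are below) =====
def Claim_equal_is_san_shoku_doukou : Prop := ∀ (hand : List String) (melds : List (List String)), Dom_is_san_shoku_doukou hand melds → Pre_is_san_shoku_doukou hand melds → Spec_is_san_shoku_doukou hand melds (is_san_shoku_doukou hand melds)

-- ===== LEMMAS AND PROOFS =====

-- the (num, suit) key list of a tile list, none iff some tile fails to split in two
def pvKeys : List String → Option (List (String × String))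
  | [] => some []
  | t :: ts =>
    match PySem.Str.split? t "_" with
    | some [suit, num] => (pvKeys ts).map (fun ks => (num, suit) :: ks)
    | _ => none

theorem pvKeys_isSome (ts : List String)
    (h : ∀ t ∈ ts, ((PySem.Str.split? t "_").getD []).length = 2) :
    ∃ ks, pvKeys ts = some ks := by
  induction ts with
  | nil => exact ⟨[], rfl⟩
  | cons t ts ih =>
    obtain ⟨ks, hks⟩ := ih (fun x hx => h x (List.mem_cons_of_mem _ hx))
    have h2 := h t (List.mem_cons_self ..)
    match hsp : PySem.Str.split? t "_" with
    | some [suit, num] => exact ⟨(num, suit) :: ks, by simp [pvKeys, hsp, hks]⟩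
    | none => simp [hsp] at h2
    | some [] => simp [hsp] at h2
    | some [a] => simp [hsp] at h2
    | some (a :: b :: c :: r) => simp [hsp] at h2

theorem pvCountLoopA_eq_foldl (ts : List String) (ks : List (String × String))
    (hks : pvKeys ts = some ks) (d : PySem.Dict (String × String) Int) :
    pvCountLoopA ts d = some (ks.foldl (fun d k => d.insert k (d.getD k 0 + 1)) d) := by
  induction ts generalizing ks d with
  | nil => simp [pvKeys] at hks; subst hks; rfl
  | cons t ts ih =>
    match hsp : PySem.Str.split? t "_" with
    | some [suit, num] =>
      simp only [pvKeys, hsp] at hks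
      obtain ⟨ks', hks', rfl⟩ := Option.map_eq_some_iff.mp hks
      simp [pvCountLoopA, hsp, ih ks' hks']
    | none => simp [pvKeys, hsp] at hks
    | some [] => simp [pvKeys, hsp] at hks
    | some [a] => simp [pvKeys, hsp] at hks
    | some (a :: b :: c :: r) => simp [pvKeys, hsp] at hks

theorem pvPairLoopB_eq (ts : List String) (ks : List (String × String))
    (hks : pvKeys ts = some ks) (acc : List (String × String)) :
    pvPairLoopB ts acc = some (acc ++ ks) := by
  induction ts generalizing ks acc with
  | nil => simp [pvKeys] at hks; subst hks; simp [pvPairLoopB]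
  | cons t ts ih =>
    match hsp : PySem.Str.split? t "_" with
    | some [suit, num] =>
      simp only [pvKeys, hsp] at hks
      obtain ⟨ks', hks', rfl⟩ := Option.map_eq_some_iff.mp hks
      simp [pvPairLoopB, hsp, ih ks' hks']
    | none => simp [pvKeys, hsp] at hks
    | some [] => simp [pvKeys, hsp] at hks
    | some [a] => simp [pvKeys, hsp] at hks
    | some (a :: b :: c :: r) => simp [pvKeys, hsp] at hks

-- A's doku accumulator, looked up at num, is the Set.update of the triplet suits filed under num
theorem pvDoku_getD (l : List ((String × String) × Int))
    (d : PySem.Dict String (PySem.Set String)) (num : String) :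
    (l.foldl (fun dm p => dm.modify p.1.1 PySem.Set.empty (fun s => s.add p.1.2)) d).getD num
        PySem.Set.empty
      = PySem.Set.update (d.getD num PySem.Set.empty)
          ((l.filter (fun p => p.1.1 == num)).map (fun p => p.1.2)) := by
  induction l generalizing d with
  | nil => rfl
  | cons p l ih =>
    simp only [List.foldl_cons, ih, List.filter_cons]
    rw [PySem.Dict.getD_modify]
    by_cases h : p.1.1 = num
    · simp [h, PySem.Set.update]
    · have hb : (p.1.1 == num) = false := by simpa using h
      simp [Ne.symm h, hb]

-- the number of triplet suits of `num`: distinct pairs of ks with first component num and count ≥ 3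
def pvTrip (ks : List (String × String)) (num : String) : Nat :=
  ((ks.toFinset).filter (fun k => k.1 = num ∧ 3 ≤ (ks.count k : Int))).card

theorem pvOfList_aux {α : Type} [BEq α] [LawfulBEq α] (xs s : List α)
    (h : (s ++ xs).Nodup) : List.foldl PySem.Set.add s xs = s ++ xs := by
  induction xs generalizing s with
  | nil => simp
  | cons x xs ih =>
    have hx : x ∉ s := by
      intro hmem
      exact (List.disjoint_of_nodup_append h) hmem (List.mem_cons_self ..)
    rw [List.foldl_cons, PySem.Set.add_of_not_mem hx, ih (s ++ [x]) (by simpa using h)]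
    simp

theorem pvOfList_nodup {α : Type} [BEq α] [LawfulBEq α] (xs : List α)
    (h : xs.Nodup) : PySem.Set.ofList xs = xs := by
  rw [PySem.Set.ofList_eq_foldl]
  simpa using pvOfList_aux xs [] (by simpa using h)

theorem pvToFinset_ofList {α : Type} [BEq α] [LawfulBEq α] [DecidableEq α] (xs : List α) :
    (PySem.Set.ofList xs).toFinset = xs.toFinset := by
  ext y
  simp [PySem.Set.mem_ofList]

-- countP over the distinct elements of a list = card of the filtered toFinset
theorem pvCountP_ofList {α : Type} [BEq α] [LawfulBEq α] [DecidableEq α]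
    (xs : List α) (p : α → Bool) :
    (PySem.Set.ofList xs).countP p = (xs.toFinset.filter (fun a => p a = true)).card := by
  rw [List.countP_eq_length_filter]
  rw [← List.toFinset_card_of_nodup ((PySem.Set.nodup_ofList xs).filter p)]
  rw [List.toFinset_filter, pvToFinset_ofList]

-- A's per-number doku set: its length equals pvTrip
theorem pvA_count (ks : List (String × String)) (num : String) :
    (PySem.Set.ofList
        (((((PySem.Set.ofList ks).map (fun k => (k, (ks.count k : Int)))).filter
              (fun p => decide (3 ≤ p.2))).filter (fun p => p.1.1 == num)).map
          (fun p => p.1.2))).length = pvTrip ks num := by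
  rw [List.filter_map, List.filter_map, List.filter_filter, List.map_map]
  have hD : ((PySem.Set.ofList ks).filter
      (fun k => ((fun p => p.1.1 == num) ∘ fun k => (k, (ks.count k : Int))) k &&
        ((fun p => decide (3 ≤ p.2)) ∘ fun k => (k, (ks.count k : Int))) k)).Nodup :=
    (PySem.Set.nodup_ofList ks).filter _
  have hmapn : (((PySem.Set.ofList ks).filter
      (fun k => ((fun p => p.1.1 == num) ∘ fun k => (k, (ks.count k : Int))) k &&
        ((fun p => decide (3 ≤ p.2)) ∘ fun k => (k, (ks.count k : Int))) k)).map
      ((fun p => p.1.2) ∘ fun k => (k, (ks.count k : Int)))).Nodup := by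
    refine List.Nodup.map_on ?_ hD
    intro x hx y hy hxy
    have hx1 : x.1 = num := by
      have := (List.mem_filter.mp hx).2; simp [Function.comp] at this; exact this.1
    have hy1 : y.1 = num := by
      have := (List.mem_filter.mp hy).2; simp [Function.comp] at this; exact this.1
    simp only [Function.comp] at hxy
    rw [Prod.ext_iff]; exact ⟨hx1.trans hy1.symm, hxy⟩
  rw [pvOfList_nodup _ hmapn, List.length_map]
  rw [← List.countP_eq_length_filter, pvCountP_ofList]
  unfold pvTrip
  congr 1
  ext k
  simp [Function.comp]

-- keys of a Set.update of the empty set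
theorem pvUpdate_empty {α : Type} [BEq α] (l : List α) :
    PySem.Set.update PySem.Set.empty l = PySem.Set.ofList l := by
  rw [PySem.Set.ofList_eq_foldl]; rfl

-- A side: the any-over-values as the existence of a number with exactly three triplet suits
theorem pvA_iff (ks : List (String × String)) :
    ((pvDokuLoopA (PySem.Dict.counter ks).items).values.any
        (fun suits => PySem.Set.len suits == 3)) = true
      ↔ ∃ num ∈ ks.map Prod.fst, pvTrip ks num = 3 := by
  have hL : pvDokuLoopA (PySem.Dict.counter ks).items
      = (((PySem.Set.ofList ks).map (fun k => (k, (ks.count k : Int)))).filter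
          (fun p => decide (3 ≤ p.2))).foldl
          (fun dm p => dm.modify p.1.1 PySem.Set.empty (fun s => s.add p.1.2)) PySem.Dict.empty := by
    rw [PySem.Dict.items_counter]
    unfold pvDokuLoopA
    rw [List.foldl_filter]
    congr 1
    funext dm p
    by_cases h : (3:Int) ≤ p.2 <;> simp [h, ge_iff_le]
  set L := (((PySem.Set.ofList ks).map (fun k => (k, (ks.count k : Int)))).filter
      (fun p => decide (3 ≤ p.2))) with hLdef
  have hkeys : (L.foldl (fun dm p => dm.modify p.1.1 PySem.Set.empty (fun s => s.add p.1.2))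
      PySem.Dict.empty).keys = PySem.Set.ofList (L.map (fun p => p.1.1)) := by
    have := PySem.Dict.keys_foldl_modify_key (l := L) (key := fun p => p.1.1)
      (d0 := (PySem.Set.empty : PySem.Set String))
      (f := fun _ p => fun s => s.add p.1.2) (d := PySem.Dict.empty)
    simpa [PySem.Dict.keys_empty, pvUpdate_empty] using this
  have hnd : (L.foldl (fun dm p => dm.modify p.1.1 PySem.Set.empty (fun s => s.add p.1.2))
      PySem.Dict.empty).keys.Nodup := by
    have := PySem.Dict.nodup_keys_foldl_modify_key (l := L) (key := fun p => p.1.1)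
      (d0 := (PySem.Set.empty : PySem.Set String))
      (f := fun _ p => fun s => s.add p.1.2) (d := PySem.Dict.empty)
      PySem.Dict.nodup_keys_empty
    simpa using this
  have hgetD : ∀ num, (L.foldl (fun dm p => dm.modify p.1.1 PySem.Set.empty
      (fun s => s.add p.1.2)) PySem.Dict.empty).getD num PySem.Set.empty
      = PySem.Set.ofList ((L.filter (fun p => p.1.1 == num)).map (fun p => p.1.2)) := by
    intro num
    rw [pvDoku_getD, PySem.Dict.getD_empty, pvUpdate_empty]
  have hpred : ∀ num, (PySem.Set.len (PySem.Set.ofList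
      ((L.filter (fun p => p.1.1 == num)).map (fun p => p.1.2))) == 3) = true
      ↔ pvTrip ks num = 3 := by
    intro num
    have := pvA_count ks num
    rw [hLdef]
    simp only [PySem.Set.len, beq_iff_eq]
    constructor
    · intro h; rw [← this]; omega
    · intro h; rw [← this] at h; omega
  rw [hL]
  rw [PySem.Dict.values_eq_map_keys _ hnd PySem.Set.empty, List.any_map, hkeys, List.any_eq_true]
  constructor
  · rintro ⟨num, hmem, hp⟩
    simp only [Function.comp] at hp
    rw [hgetD num] at hp
    refine ⟨num, ?_, (hpred num).mp hp⟩
    have hmem' := (PySem.Set.mem_ofList _ _).mp hmem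
    obtain ⟨p, hpL, rfl⟩ := List.mem_map.mp hmem'
    have hpL' := (List.mem_filter.mp hpL).1
    obtain ⟨k, hk, rfl⟩ := List.mem_map.mp hpL'
    exact List.mem_map.mpr ⟨k, (PySem.Set.mem_ofList _ _).mp hk, rfl⟩
  · rintro ⟨num, hmem, h3⟩
    have hpos : 0 < pvTrip ks num := by omega
    rw [pvTrip, Finset.card_pos] at hpos
    obtain ⟨k, hk⟩ := hpos
    rw [Finset.mem_filter, List.mem_toFinset] at hk
    obtain ⟨hkks, hk1, hkcnt⟩ := hk
    have hpL : (k, (ks.count k : Int)) ∈ L := by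
      rw [hLdef, List.mem_filter]
      exact ⟨List.mem_map.mpr ⟨k, (PySem.Set.mem_ofList _ _).mpr hkks, rfl⟩, by simpa using hkcnt⟩
    refine ⟨num, (PySem.Set.mem_ofList _ _).mpr
      (List.mem_map.mpr ⟨(k, (ks.count k : Int)), hpL, hk1⟩), ?_⟩
    simp only [Function.comp]
    rw [hgetD num]
    exact (hpred num).mpr h3

-- ----- B side: the double stable sort and the run-length scan -----

theorem pvFilter_insertBy {α : Type} (key : α → String) (x : α) (v : String) (ys : List α)
    (h : ys.Pairwise (fun a b => key a ≤ key b)) :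
    (PySem.List.insertBy (fun a b => decide (key a < key b)) x ys).filter (fun y => key y == v)
      = ys.filter (fun y => key y == v) ++ (if key x == v then [x] else []) := by
  induction ys with
  | nil =>
    by_cases hv : (key x == v) <;> simp [PySem.List.insertBy, hv, List.filter]
  | cons y ys ih =>
    rw [List.pairwise_cons] at h
    by_cases hlt : key x < key y
    · rw [show PySem.List.insertBy (fun a b => decide (key a < key b)) x (y :: ys)
          = x :: y :: ys from by simp [PySem.List.insertBy, hlt]]
      by_cases hv : key x = v
      · have hemp : (y :: ys).filter (fun z => key z == v) = [] := by
          rw [List.filter_eq_nil_iff]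
          intro z hz
          have hyz : key y ≤ key z := by
            rcases List.mem_cons.mp hz with rfl | hz'
            · exact le_refl _
            · exact h.1 z hz'
          have hxz : key x < key z := lt_of_lt_of_le hlt hyz
          have hne : key z ≠ v := fun he => absurd hxz (by rw [hv, he]; exact lt_irrefl v)
          simpa using hne
        rw [List.filter_cons_of_pos (by simpa using hv), hemp]
        simp [hv]
      · rw [List.filter_cons_of_neg (by simpa using hv)]
        simp [hv]
    · rw [show PySem.List.insertBy (fun a b => decide (key a < key b)) x (y :: ys)
          = y :: PySem.List.insertBy (fun a b => decide (key a < key b)) x ys from by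
            simp [PySem.List.insertBy, hlt]]
      rw [List.filter_cons, List.filter_cons, ih h.2]
      split <;> simp

-- stability of sorted: filtering at one key value undoes the sort

theorem pvFilter_sorted {α : Type} (key : α → String) (v : String) (l : List α) :
    (PySem.List.sorted l key).filter (fun y => key y == v) = l.filter (fun y => key y == v) := by
  induction l using List.reverseRecOn with
  | nil => simp [PySem.List.sorted]
  | append_singleton l x ih =>
    have hstep : PySem.List.sorted (l ++ [x]) key
        = PySem.List.insertBy (fun a b => decide (key a < key b)) x (PySem.List.sorted l key) := by
      rw [PySem.List.sorted_eq_foldl_insertBy, PySem.List.sorted_eq_foldl_insertBy,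
        List.foldl_append]
      rfl
    rw [hstep, pvFilter_insertBy key x v _ (PySem.List.sorted_pairwise l key), ih,
      List.filter_append]
    congr 1
    by_cases hv : (key x == v) <;> simp [List.filter, hv]

-- on a list sorted by first component whose keys all dominate v, the v-block is a prefix

theorem pvTakeDropFst (v : String) (l : List (String × String))
    (hp : l.Pairwise (fun a b => a.1 ≤ b.1)) (hlb : ∀ x ∈ l, v ≤ x.1) :
    l.takeWhile (fun q => q.1 == v) = l.filter (fun q => q.1 == v)
      ∧ l.dropWhile (fun q => q.1 == v) = l.filter (fun q => !(q.1 == v)) := by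
  induction l with
  | nil => simp
  | cons a t ih =>
    rw [List.pairwise_cons] at hp
    by_cases ha : a.1 = v
    · have hb : (a.1 == v) = true := by simpa using ha
      obtain ⟨h1, h2⟩ := ih hp.2 (fun x hx => hlb x (List.mem_cons_of_mem _ hx))
      simp [hb, h1, h2]
    · have hb : (a.1 == v) = false := by simpa using ha
      have hlt : v < a.1 := lt_of_le_of_ne (hlb a (List.mem_cons_self ..)) (Ne.symm ha)
      have hnone : t.filter (fun q => q.1 == v) = [] := by
        rw [List.filter_eq_nil_iff]
        intro q hq
        have : a.1 ≤ q.1 := hp.1 q hq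
        have hvq : v < q.1 := lt_of_lt_of_le hlt this
        have hne : q.1 ≠ v := fun he => absurd (he ▸ hvq) (lt_irrefl v)
        simpa using hne
      have hall : t.filter (fun q => !(q.1 == v)) = t := by
        rw [List.filter_eq_self]
        intro q hq
        have : v < q.1 := lt_of_lt_of_le hlt (hp.1 q hq)
        have hne : q.1 ≠ v := fun he => absurd (he ▸ this) (lt_irrefl v)
        simpa using hne
      simp [hb, hnone, hall]

-- within one number block (sorted by suit), the run of the head pair is exactly its copies

theorem pvTakeDropPair (p : String × String) (l : List (String × String))
    (hp : l.Pairwise (fun a b => a.2 ≤ b.2)) (hlb : ∀ x ∈ l, p.2 ≤ x.2)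
    (hf : ∀ x ∈ l, x.1 = p.1) :
    l.takeWhile (fun q => q == p) = l.filter (fun q => q == p)
      ∧ l.dropWhile (fun q => q == p) = l.filter (fun q => !(q == p)) := by
  induction l with
  | nil => simp
  | cons a t ih =>
    rw [List.pairwise_cons] at hp
    by_cases ha : a = p
    · have hb : (a == p) = true := by simpa using ha
      obtain ⟨h1, h2⟩ := ih hp.2 (fun x hx => hlb x (List.mem_cons_of_mem _ hx))
        (fun x hx => hf x (List.mem_cons_of_mem _ hx))
      simp [hb, h1, h2]
    · have hb : (a == p) = false := by simpa using ha
      have ha2 : a.2 ≠ p.2 := by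
        intro he
        exact ha (Prod.ext_iff.mpr ⟨hf a (List.mem_cons_self ..), he⟩)
      have hlt : p.2 < a.2 := lt_of_le_of_ne (hlb a (List.mem_cons_self ..)) (Ne.symm ha2)
      have hnone : t.filter (fun q => q == p) = [] := by
        rw [List.filter_eq_nil_iff]
        intro q hq
        have : p.2 < q.2 := lt_of_lt_of_le hlt (hp.1 q hq)
        have hne : q ≠ p := fun he => absurd (he ▸ this) (lt_irrefl _)
        simpa using hne
      have hall : t.filter (fun q => !(q == p)) = t := by
        rw [List.filter_eq_self]
        intro q hq
        have : p.2 < q.2 := lt_of_lt_of_le hlt (hp.1 q hq)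
        have hne : q ≠ p := fun he => absurd (he ▸ this) (lt_irrefl _)
        simpa using hne
      simp [hb, hnone, hall]

theorem pvInnerRunsB_eq (l : List (String × String)) (trips : Int)
    (hp : l.Pairwise (fun a b => a.2 ≤ b.2))
    (hf : ∀ x ∈ l, ∀ y ∈ l, x.1 = y.1) :
    pvInnerRunsB l trips
      = trips + ((l.toFinset.filter (fun q => 3 ≤ (l.count q : Int))).card : Int) := by
  induction l, trips using pvInnerRunsB.induct with
  | case1 trips => simp [pvInnerRunsB]
  | case2 p rest trips ih =>
    rw [List.pairwise_cons] at hp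
    obtain ⟨htake, hdrop⟩ := pvTakeDropPair p rest hp.2 (fun x hx => hp.1 x hx)
      (fun x hx => (hf x (List.mem_cons_of_mem _ hx) p (List.mem_cons_self ..)))
    set run := rest.filter (fun q => q == p) with hrun
    set rest' := rest.filter (fun q => !(q == p)) with hrest'
    have hsplit : rest = run ++ rest' := by
      conv_lhs => rw [← List.takeWhile_append_dropWhile (p := fun q => q == p) (l := rest)]
      rw [htake, hdrop]
    have hrunlen : run.length = rest.count p := by
      rw [List.count_eq_countP, List.countP_eq_length_filter]
    have hnp : p ∉ rest' := by
      intro hmem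
      have := (List.mem_filter.mp hmem).2
      simp at this
    have hrunmem : ∀ q ∈ run, q = p := by
      intro q hq
      have := (List.mem_filter.mp hq).2
      simpa using this
    have hcounts : ∀ q ∈ rest', (p :: rest).count q = rest'.count q := by
      intro q hq
      have hqp : q ≠ p := by
        have := (List.mem_filter.mp hq).2
        simpa using this
      have hzero : run.count q = 0 := List.count_eq_zero.mpr (fun hmem => hqp (hrunmem q hmem))
      simp [hsplit, List.count_append, hzero, Ne.symm hqp]
    have hcp : (p :: rest).count p = run.length + 1 := by
      rw [List.count_cons_self, hrunlen]
    have hTF : (p :: rest).toFinset = insert p rest'.toFinset := by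
      ext q
      simp only [List.toFinset_cons, Finset.mem_insert, List.mem_toFinset]
      constructor
      · rintro (rfl | hq)
        · exact Or.inl rfl
        · rw [hsplit, List.mem_append] at hq
          rcases hq with hq | hq
          · exact Or.inl (hrunmem q hq)
          · exact Or.inr hq
      · rintro (rfl | hq)
        · exact Or.inl rfl
        · exact Or.inr (by rw [hsplit, List.mem_append]; exact Or.inr hq)
    have hfiltcongr : rest'.toFinset.filter (fun q => 3 ≤ ((p :: rest).count q : Int))
        = rest'.toFinset.filter (fun q => 3 ≤ (rest'.count q : Int)) := by
      apply Finset.filter_congr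
      intro q hq
      rw [hcounts q (List.mem_toFinset.mp hq)]
    have hcard : ((p :: rest).toFinset.filter (fun q => 3 ≤ ((p :: rest).count q : Int))).card
        = (if 3 ≤ ((p :: rest).count p : Int) then 1 else 0)
          + (rest'.toFinset.filter (fun q => 3 ≤ (rest'.count q : Int))).card := by
      rw [hTF, Finset.filter_insert]
      split
      · rw [Finset.card_insert_of_notMem (fun hmem => hnp
          (List.mem_toFinset.mp (Finset.mem_of_mem_filter _ hmem))), hfiltcongr]
        omega
      · rw [hfiltcongr]
        omega
    have hrest'p : rest'.Pairwise (fun a b => a.2 ≤ b.2) :=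
      List.Pairwise.sublist List.filter_sublist hp.2
    have hrest'f : ∀ x ∈ rest', ∀ y ∈ rest', x.1 = y.1 := by
      intro x hx y hy
      exact hf x (List.mem_cons_of_mem _ (List.mem_of_mem_filter hx))
        y (List.mem_cons_of_mem _ (List.mem_of_mem_filter hy))
    rw [htake, hdrop] at ih
    simp only [dite_eq_ite] at ih
    rw [pvInnerRunsB, htake, hdrop, ih hrest'p hrest'f, hcard, hcp]
    split_ifs with h1 h2 h2 <;> push_cast at * <;> omega

theorem pvOuterScanB_iff (l : List (String × String))
    (hp : l.Pairwise (fun a b => a.1 ≤ b.1))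
    (hblk : ∀ v, (l.filter (fun q => q.1 == v)).Pairwise (fun a b => a.2 ≤ b.2)) :
    pvOuterScanB l = true
      ↔ ∃ num ∈ l.map Prod.fst,
          (l.toFinset.filter (fun q => q.1 = num ∧ 3 ≤ (l.count q : Int))).card = 3 := by
  have main : ∀ (n : Nat) (l : List (String × String)), l.length ≤ n →
      l.Pairwise (fun a b => a.1 ≤ b.1) →
      (∀ v, (l.filter (fun q => q.1 == v)).Pairwise (fun a b => a.2 ≤ b.2)) →
      (pvOuterScanB l = true
        ↔ ∃ num ∈ l.map Prod.fst,
            (l.toFinset.filter (fun q => q.1 = num ∧ 3 ≤ (l.count q : Int))).card = 3) := by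
    intro n
    induction n with
    | zero =>
      intro l hlen hp hblk
      rw [List.length_eq_zero_iff.mp (Nat.le_zero.mp hlen)]
      simp [pvOuterScanB]
    | succ n ihn =>
      intro l hlen hp hblk
      match l with
      | [] => simp [pvOuterScanB]
      | p :: rest =>
          have hlb : ∀ x ∈ p :: rest, p.1 ≤ x.1 := by
            intro x hx
            rcases List.mem_cons.mp hx with rfl | hx'
            · exact le_refl _
            · exact (List.pairwise_cons.mp hp).1 x hx'
          obtain ⟨htake, hdrop⟩ := pvTakeDropFst p.1 (p :: rest) hp hlb
          set B := (p :: rest).filter (fun q => q.1 == p.1) with hB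
          set R := (p :: rest).filter (fun q => !(q.1 == p.1)) with hR
          have hsplit : p :: rest = B ++ R := by
            conv_lhs => rw [← List.takeWhile_append_dropWhile (p := fun q => q.1 == p.1)
              (l := p :: rest)]
            rw [htake, hdrop]
          have hblockeq : p :: rest.takeWhile (fun q => q.1 == p.1) = B := by
            rw [← htake, List.takeWhile_cons_of_pos (by simp)]
          have hdropeq : rest.dropWhile (fun q => q.1 == p.1) = R := by
            rw [← hdrop, List.dropWhile_cons_of_pos (by simp)]
          have hBmem : ∀ q ∈ B, q.1 = p.1 := by
            intro q hq
            simpa using (List.mem_filter.mp hq).2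
          have hRmem : ∀ q ∈ R, q.1 ≠ p.1 := by
            intro q hq
            simpa using (List.mem_filter.mp hq).2
          have hinner : pvInnerRunsB B 0
              = ((B.toFinset.filter (fun q => 3 ≤ (B.count q : Int))).card : Int) := by
            rw [pvInnerRunsB_eq B 0 (hblk p.1)
              (fun x hx y hy => (hBmem x hx).trans (hBmem y hy).symm)]
            omega
          have hBcount : ∀ q ∈ B, B.count q = (p :: rest).count q := by
            intro q hq
            exact List.count_filter (by simpa using hBmem q hq)
          have hBtoL : (B.toFinset.filter (fun q => 3 ≤ (B.count q : Int)))
              = ((p :: rest).toFinset.filter (fun q => q.1 = p.1 ∧ 3 ≤ ((p :: rest).count q : Int))) := by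
            ext q
            simp only [Finset.mem_filter, List.mem_toFinset]
            constructor
            · rintro ⟨hq, hc⟩
              refine ⟨List.mem_of_mem_filter hq, hBmem q hq, ?_⟩
              rwa [← hBcount q hq]
            · rintro ⟨hq, hq1, hc⟩
              have hqB : q ∈ B := List.mem_filter.mpr ⟨hq, by simpa using hq1⟩
              exact ⟨hqB, by rwa [hBcount q hqB]⟩
          have hCR : ∀ num, num ≠ p.1 →
              ((p :: rest).toFinset.filter (fun q => q.1 = num ∧ 3 ≤ ((p :: rest).count q : Int)))
                = (R.toFinset.filter (fun q => q.1 = num ∧ 3 ≤ (R.count q : Int))) := by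
            intro num hnum
            ext q
            simp only [Finset.mem_filter, List.mem_toFinset]
            constructor
            · rintro ⟨hq, hq1, hc⟩
              have hqR : q ∈ R := by
                rw [hsplit, List.mem_append] at hq
                rcases hq with hq | hq
                · exact absurd (hq1 ▸ hBmem q hq) hnum
                · exact hq
              have hcnt : (p :: rest).count q = R.count q := by
                rw [hsplit, List.count_append, List.count_eq_zero.mpr
                  (fun hmem => hnum (hq1 ▸ hBmem q hmem)), Nat.zero_add]
              exact ⟨hqR, hq1, by rwa [← hcnt]⟩
            · rintro ⟨hq, hq1, hc⟩
              have hcnt : (p :: rest).count q = R.count q := by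
                rw [hsplit, List.count_append, List.count_eq_zero.mpr
                  (fun hmem => hnum (hq1 ▸ hBmem q hmem)), Nat.zero_add]
              exact ⟨by rw [hsplit, List.mem_append]; exact Or.inr hq, hq1, by rwa [hcnt]⟩
          have hlen' : R.length ≤ n := by
            have h1 : R.length ≤ rest.length := by
              rw [← hdropeq]
              exact List.length_dropWhile_le _ _
            have h2 : rest.length + 1 ≤ n + 1 := by simpa using hlen
            omega
          rw [pvOuterScanB, hblockeq, hdropeq, hinner, hBtoL]
          by_cases h3 : ((p :: rest).toFinset.filter
              (fun q => q.1 = p.1 ∧ 3 ≤ ((p :: rest).count q : Int))).card = 3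
          · rw [h3]
            have hcond : ((((3:Nat) : Int)) == 3) = true := by decide
            rw [if_pos hcond]
            exact iff_of_true rfl ⟨p.1, List.mem_map.mpr ⟨p, List.mem_cons_self .., rfl⟩, h3⟩
          · have hne : ((((p :: rest).toFinset.filter
                (fun q => q.1 = p.1 ∧ 3 ≤ ((p :: rest).count q : Int))).card : Int) == 3) = false := by
              simp only [beq_eq_false_iff_ne, ne_eq]
              intro hc
              exact h3 (by exact_mod_cast hc)
            rw [hne, if_neg (by simp)]
            rw [ihn R hlen' (List.Pairwise.sublist List.filter_sublist hp)
              (fun v => List.Pairwise.sublist (List.Sublist.filter _ List.filter_sublist) (hblk v))]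
            constructor
            · rintro ⟨num, hm, hc⟩
              obtain ⟨q, hq, rfl⟩ := List.mem_map.mp hm
              have hq1 : q.1 ≠ p.1 := hRmem q hq
              refine ⟨q.1, List.mem_map.mpr ⟨q, by rw [hsplit, List.mem_append]; exact Or.inr hq, rfl⟩, ?_⟩
              rw [hCR q.1 hq1]
              exact hc
            · rintro ⟨num, hm, hc⟩
              by_cases hnum : num = p.1
              · exact absurd (hnum ▸ hc) h3
              · obtain ⟨q, hq, rfl⟩ := List.mem_map.mp hm
                have hqR : q ∈ R := by
                  rw [hsplit, List.mem_append] at hq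
                  rcases hq with hq | hq
                  · exact absurd (hBmem q hq) hnum
                  · exact hq
                refine ⟨q.1, List.mem_map.mpr ⟨q, hqR, rfl⟩, ?_⟩
                rw [← hCR q.1 hnum]
                exact hc
  exact main l.length l (le_refl _) hp hblk

theorem pvB_iff (ks : List (String × String)) :
    pvOuterScanB (PySem.List.sorted (PySem.List.sorted ks (fun p => p.2)) (fun p => p.1)) = true
      ↔ ∃ num ∈ ks.map Prod.fst, pvTrip ks num = 3 := by
  have hperm : (PySem.List.sorted (PySem.List.sorted ks (fun p => p.2))
      (fun p => p.1)).Perm ks :=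
    (PySem.List.sorted_perm _ _ _).trans (PySem.List.sorted_perm _ _ _)
  have hp := PySem.List.sorted_pairwise (PySem.List.sorted ks (fun p => p.2)) (fun p => p.1)
  have hblk : ∀ v, ((PySem.List.sorted (PySem.List.sorted ks (fun p => p.2))
      (fun p => p.1)).filter (fun q => q.1 == v)).Pairwise (fun a b => a.2 ≤ b.2) := by
    intro v
    rw [pvFilter_sorted (fun p : String × String => p.1) v]
    exact List.Pairwise.sublist List.filter_sublist
      (PySem.List.sorted_pairwise ks (fun p => p.2))
  rw [pvOuterScanB_iff _ hp hblk]
  have hTF := List.toFinset_eq_of_perm _ _ hperm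
  have hsets : ∀ num, ((PySem.List.sorted (PySem.List.sorted ks (fun p => p.2))
        (fun p => p.1)).toFinset.filter (fun q => q.1 = num ∧
          3 ≤ ((PySem.List.sorted (PySem.List.sorted ks (fun p => p.2))
            (fun p => p.1)).count q : Int)))
      = (ks.toFinset.filter (fun q => q.1 = num ∧ 3 ≤ (ks.count q : Int))) := by
    intro num
    rw [hTF]
    apply Finset.filter_congr
    intro q hq
    rw [hperm.count_eq]
  constructor
  · rintro ⟨num, hm, hc⟩
    exact ⟨num, ((hperm.map Prod.fst).mem_iff).mp hm,
      by rw [pvTrip, ← hsets num]; exact hc⟩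
  · rintro ⟨num, hm, hc⟩
    exact ⟨num, ((hperm.map Prod.fst).mem_iff).mpr hm,
      by rw [pvTrip] at hc; rw [hsets num]; exact hc⟩

-- ===== VERDICT (by name: the statement is the Claim_ definition above) =====
theorem is_san_shoku_doukou_spec : Claim_equal_is_san_shoku_doukou := by
  intro hand melds _hdom hpre
  obtain ⟨ks, hks⟩ := pvKeys_isSome (hand ++ melds.flatMap (fun meld => meld)) hpre
  have hA := pvCountLoopA_eq_foldl _ ks hks PySem.Dict.empty
  rw [PySem.Dict.foldl_insert_getD_add_one_eq_counter] at hA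
  have hB := pvPairLoopB_eq _ ks hks []
  rw [List.nil_append] at hB
  unfold Spec_is_san_shoku_doukou is_san_shoku_doukou is_san_shoku_doukou_alt
  simp only [hA, hB]
  rw [Bool.eq_iff_iff, pvA_iff, pvB_iff]
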